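-- pv_equiv track=rewrite | github.com/kylebisley/starter-snake-python | app/main.py | setEdge
-- ===== SOURCE A (Python) =====
-- WALL_SPACE = 10
--
-- OPEN_SPACE = 5
--
-- def setEdge(dataDump):
--     """
--     Sets edge of gamemap to the value '2'
--     Args:
--         dataDump (list): Converted JSON data
--
--     Returns:
--         Gameboard with the edges initialised to '2'
--
--     """
--     board_width = dataDump["board"]["width"]
--     board_height = dataDump["board"]["height"]
--     board = [[1 for x in range(board_width)] for y in range(board_height)]
--     for x in range(board_width):
--         for y in range(board_height):
--             # Bottom of board
--             if(y == dataDump["board"]["height"] - 1):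
--                 board[y][x] = WALL_SPACE
--             # Top of Board
--             elif(y == 0):
--                 board[y][x] = WALL_SPACE
--             # Right side of board
--             elif (x == dataDump["board"]["width"] - 1):
--                 board[y][x] = WALL_SPACE
--             # Left side of board
--             elif(x == 0):
--                 board[y][x] = WALL_SPACE
--             # Anything Else
--             else:
--                 board[y][x] = OPEN_SPACE
--     return board
-- ===== SOURCE B (Python) =====
-- WALL_SPACE = 10
--
-- OPEN_SPACE = 5
--
-- def setEdge(dataDump):
--     """Bulk-fill the board with OPEN_SPACE, then paint the border rows/columns."""
--     board_width = dataDump["board"]["width"]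
--     board_height = dataDump["board"]["height"]
--     board = [[OPEN_SPACE] * board_width for _ in range(board_height)]
--     if board:
--         board[0] = [WALL_SPACE] * board_width
--         board[-1] = [WALL_SPACE] * board_width
--     for row in board:
--         if row:
--             row[0] = WALL_SPACE
--             row[-1] = WALL_SPACE
--     return board
-- ===== Notes on version B (the rewrite author's own statement) =====
-- stated objective: simpler
-- what changed: Replaces the per-cell four-way conditional over a nested x/y loop with a bulk fill of OPEN_SPACE rows followed by painting the two border rows and the two border columns.
import Mathlib
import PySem

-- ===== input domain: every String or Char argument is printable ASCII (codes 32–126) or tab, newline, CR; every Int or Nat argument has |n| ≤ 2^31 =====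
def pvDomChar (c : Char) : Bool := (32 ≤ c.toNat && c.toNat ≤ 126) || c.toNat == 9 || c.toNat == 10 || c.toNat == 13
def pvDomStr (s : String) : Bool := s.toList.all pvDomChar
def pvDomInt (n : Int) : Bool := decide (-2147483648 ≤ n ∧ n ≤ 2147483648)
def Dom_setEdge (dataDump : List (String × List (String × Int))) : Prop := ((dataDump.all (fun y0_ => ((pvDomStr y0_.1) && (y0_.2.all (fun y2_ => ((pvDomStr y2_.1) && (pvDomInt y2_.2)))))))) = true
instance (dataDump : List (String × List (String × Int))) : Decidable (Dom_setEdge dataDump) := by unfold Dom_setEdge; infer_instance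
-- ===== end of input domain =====

-- B changes only the construction strategy (bulk fill, then paint borders); same return value.

-- ===== PORT A =====
-- body of A after the two dict lookups: build a board of 1s, then overwrite every
-- cell through the nested x/y loop with the four-way conditional
def setEdgeCoreA (w h : Int) : List (List Int) :=
  let board := (PySem.List.pyRange 0 h 1).map (fun _ => (PySem.List.pyRange 0 w 1).map (fun _ => (1 : Int)))
  (PySem.List.pyRange 0 w 1).foldl (fun board x =>
    (PySem.List.pyRange 0 h 1).foldl (fun board y =>
      board.set y.toNat ((board.getD y.toNat []).set x.toNat
        (if y = h - 1 then (10 : Int)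
         else if y = 0 then 10
         else if x = w - 1 then 10
         else if x = 0 then 10
         else 5))) board) board

def setEdge (dataDump : List (String × List (String × Int))) : List (List Int) :=
  match (PySem.Dict.ofList dataDump).get? "board" with
  | none => []   -- Python raises KeyError here; excluded by Pre_setEdge
  | some brd =>
    match (PySem.Dict.ofList brd).get? "width", (PySem.Dict.ofList brd).get? "height" with
    | some w, some h => setEdgeCoreA w h
    | _, _ => []   -- KeyError; excluded by Pre_setEdge

-- ===== PORT B =====
-- body of B after the two dict lookups: fill with OPEN_SPACE (5), replace first and
-- last rows by wall rows, then set the first and last entry of every row to 10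
def setEdgeCoreB (w h : Int) : List (List Int) :=
  let board := List.replicate h.toNat (List.replicate w.toNat (5 : Int))
  let board :=
    if board.isEmpty then board
    else (board.set 0 (List.replicate w.toNat (10 : Int))).set (board.length - 1)
           (List.replicate w.toNat (10 : Int))
  board.map (fun row =>
    if row.isEmpty then row
    else (row.set 0 (10 : Int)).set (row.length - 1) 10)

def setEdge_alt (dataDump : List (String × List (String × Int))) : List (List Int) :=
  match (PySem.Dict.ofList dataDump).get? "board" with
  | none => []   -- Python raises KeyError here; excluded by Pre_setEdge
  | some brd =>
    match (PySem.Dict.ofList brd).get? "width" with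
    | none => []   -- KeyError; excluded by Pre_setEdge
    | some w =>
      match (PySem.Dict.ofList brd).get? "height" with
      | none => []   -- KeyError; excluded by Pre_setEdge
      | some h => setEdgeCoreB w h

-- ===== PRECONDITION & SPEC =====
-- Pre_ excludes exactly the inputs where the Python raises KeyError: a missing
-- "board" key, or a board dict missing "width" or "height".
def Pre_setEdge (dataDump : List (String × List (String × Int))) : Prop :=
  (match (PySem.Dict.ofList dataDump).get? "board" with
   | none => false
   | some brd =>
       ((PySem.Dict.ofList brd).get? "width").isSome &&
       ((PySem.Dict.ofList brd).get? "height").isSome) = true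
instance (dataDump : List (String × List (String × Int))) : Decidable (Pre_setEdge dataDump) := by
  unfold Pre_setEdge; infer_instance

def pvWitness_setEdge : (List (String × List (String × Int))) :=
  [("board", [("width", 3), ("height", 4)])]

def Spec_setEdge (dataDump : List (String × List (String × Int))) (out : List (List Int)) : Prop := out = setEdge_alt dataDump
instance (dataDump : List (String × List (String × Int))) (out : List (List Int)) : Decidable (Spec_setEdge dataDump out) := by unfold Spec_setEdge; infer_instance

-- ===== CLAIM (what is proved, stated in full; the proofs are below) =====
def Claim_equal_setEdge : Prop := ∀ (dataDump : List (String × List (String × Int))), Dom_setEdge dataDump → Pre_setEdge dataDump → Spec_setEdge dataDump (setEdge dataDump)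

-- ===== LEMMAS AND PROOFS =====

-- cell value A writes at column x, row y (natural indices)
def pvVal (w h : Int) (x y : Nat) : Int :=
  if (y : Int) = h - 1 then 10
  else if (y : Int) = 0 then 10
  else if (x : Int) = w - 1 then 10
  else if (x : Int) = 0 then 10
  else 5

-- the common normal form of both cores
def pvGrid (w h : Int) : List (List Int) :=
  (List.range h.toNat).map (fun y => (List.range w.toNat).map (fun x => pvVal w h x y))

lemma foldl_set_range {α : Type} (d : α) (g : Nat → α → α) :
    ∀ (n : Nat) (b : List α), n ≤ b.length →
    (List.range n).foldl (fun acc k => acc.set k (g k (acc.getD k d))) b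
      = ((List.range n).map (fun k => g k (b.getD k d))) ++ b.drop n := by
  intro n
  induction n with
  | zero => intro b _; simp
  | succ n ih =>
    intro b hb
    have hn : n < b.length := hb
    rw [List.range_succ, List.foldl_append, List.map_append, ih b (Nat.le_of_lt hn)]
    have hlen : ((List.range n).map (fun k => g k (b.getD k d))).length = n := by simp
    have hgetD : (((List.range n).map (fun k => g k (b.getD k d))) ++ b.drop n).getD n d
        = b.getD n d := by
      rw [List.getD_append_right _ _ _ _ (by omega), hlen, Nat.sub_self]
      simp [List.getD_eq_getElem?_getD, List.getElem?_drop]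
    simp only [List.foldl_cons, List.foldl_nil, hgetD]
    rw [List.set_append_right _ _ (by omega : ((List.range n).map (fun k => g k (b.getD k d))).length ≤ n),
        List.drop_eq_getElem_cons hn, hlen, Nat.sub_self, List.set_cons_zero]
    simp [List.getD_eq_getElem?_getD, List.getElem?_eq_getElem hn, List.append_assoc]

lemma rowfold_eq (w h : Int) (y : Nat) :
    (List.range w.toNat).foldl (fun r x => r.set x (pvVal w h x y))
      ((List.range w.toNat).map (fun _ => (1 : Int)))
    = (List.range w.toNat).map (fun x => pvVal w h x y) := by
  have h0 := foldl_set_range (0 : Int) (fun x (_ : Int) => pvVal w h x y) w.toNat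
    ((List.range w.toNat).map (fun _ => (1 : Int))) (by simp)
  rw [List.drop_eq_nil_of_le (by simp), List.append_nil] at h0
  exact h0

lemma outerA (w h : Int) (n : Nat) :
    (List.range n).foldl (fun bd x => (List.range h.toNat).foldl
        (fun bd y => bd.set y ((bd.getD y []).set x (pvVal w h x y))) bd)
      ((List.range h.toNat).map (fun _ => (List.range w.toNat).map (fun _ => (1 : Int))))
    = (List.range h.toNat).map (fun y =>
        (List.range n).foldl (fun r x => r.set x (pvVal w h x y))
          ((List.range w.toNat).map (fun _ => (1 : Int)))) := by
  induction n with
  | zero => simp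
  | succ n ih =>
    rw [List.range_succ, List.foldl_append, ih]
    simp only [List.foldl_cons, List.foldl_nil]
    have hfold := foldl_set_range ([] : List Int) (fun y (row : List Int) => row.set n (pvVal w h n y)) h.toNat
      ((List.range h.toNat).map (fun y =>
        (List.range n).foldl (fun r x => r.set x (pvVal w h x y))
          ((List.range w.toNat).map (fun _ => (1 : Int))))) (by simp)
    rw [List.drop_eq_nil_of_le (by simp), List.append_nil] at hfold
    refine hfold.trans ?_
    apply List.map_congr_left
    intro y hy
    have hy' : y < h.toNat := List.mem_range.mp hy
    simp [List.foldl_append, List.getD_eq_getElem?_getD, List.getElem?_map,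
      List.getElem?_range hy']

lemma coreA_eq_grid (w h : Int) : setEdgeCoreA w h = pvGrid w h := by
  unfold setEdgeCoreA pvGrid
  rw [PySem.List.pyRange_one, PySem.List.pyRange_one]
  simp only [sub_zero, zero_add, List.foldl_map, List.map_map, Function.comp_def, Int.toNat_natCast]
  calc _ = (List.range h.toNat).map (fun y =>
        (List.range w.toNat).foldl (fun r x => r.set x (pvVal w h x y))
          ((List.range w.toNat).map (fun _ => (1 : Int)))) := outerA w h w.toNat
    _ = _ := by
        apply List.map_congr_left
        intro y _
        exact rowfold_eq w h y

lemma paint_replicate (w h : Int) (y : Nat) (c : Int)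
    (hc : ∀ x : Nat, x < w.toNat → ¬ ((x : Int) = w - 1) → ¬ ((x : Int) = 0) → pvVal w h x y = c)
    (hwall : ∀ x : Nat, x < w.toNat → ((x : Int) = w - 1 ∨ (x : Int) = 0) → pvVal w h x y = 10) :
    (if (List.replicate w.toNat c).isEmpty then List.replicate w.toNat c
     else ((List.replicate w.toNat c).set 0 (10 : Int)).set ((List.replicate w.toNat c).length - 1) 10)
    = (List.range w.toNat).map (fun x => pvVal w h x y) := by
  by_cases hw : w.toNat = 0
  · simp [hw]
  · rw [if_neg (by simp [hw])]
    apply List.ext_getElem (by simp)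
    intro x hx1 hx2
    have hxW : x < w.toNat := by simpa using hx2
    have hwi : (w.toNat : Int) = w := Int.toNat_of_nonneg (by omega)
    simp only [List.getElem_map, List.getElem_range, List.getElem_set,
      List.length_replicate, List.getElem_replicate]
    by_cases hlast : (x : Int) = w - 1
    · rw [hwall x hxW (Or.inl hlast)]
      have : w.toNat - 1 = x := by omega
      simp [this]
    · by_cases h0 : (x : Int) = 0
      · rw [hwall x hxW (Or.inr h0)]
        have hx0 : x = 0 := by omega
        have : ¬ (w.toNat - 1 = x) := by omega
        simp [hx0]
      · rw [hc x hxW hlast h0]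
        have h1 : ¬ (0 = x) := by omega
        have h2 : ¬ (w.toNat - 1 = x) := by omega
        simp [h1, h2]

lemma coreB_eq_grid (w h : Int) : setEdgeCoreB w h = pvGrid w h := by
  unfold setEdgeCoreB pvGrid
  dsimp only
  by_cases hh : h.toNat = 0
  · simp [hh]
  · have hH : 0 < h.toNat := Nat.pos_of_ne_zero hh
    have hhi : (h.toNat : Int) = h := Int.toNat_of_nonneg (by omega)
    rw [if_neg (by simp [hh])]
    apply List.ext_getElem (by simp)
    intro y hy1 hy2
    have hyH : y < h.toNat := by simpa using hy2
    simp only [List.getElem_map, List.getElem_range, List.getElem_set,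
      List.length_replicate, List.getElem_replicate]
    by_cases hlast : h.toNat - 1 = y
    · rw [if_pos hlast]
      rw [paint_replicate w h y 10 (fun x _ hx1 hx2 => by unfold pvVal; split_ifs <;> omega)
            (fun x _ _ => by unfold pvVal; split_ifs <;> omega)]
    · rw [if_neg hlast]
      by_cases h0 : (0 : Nat) = y
      · rw [if_pos h0]
        rw [paint_replicate w h y 10 (fun x _ hx1 hx2 => by unfold pvVal; split_ifs <;> omega)
              (fun x _ _ => by unfold pvVal; split_ifs <;> omega)]
      · rw [if_neg h0]
        rw [paint_replicate w h y 5 (fun x _ hx1 hx2 => by unfold pvVal; split_ifs <;> omega)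
              (fun x _ _ => by unfold pvVal; split_ifs <;> omega)]

-- ===== VERDICT (by name: the statement is the Claim_ definition above) =====
theorem setEdge_spec : Claim_equal_setEdge := by
  intro dataDump _ hPre
  unfold Spec_setEdge setEdge setEdge_alt
  cases hb : (PySem.Dict.ofList dataDump).get? "board" with
  | none => rfl
  | some brd =>
    cases hw : (PySem.Dict.ofList brd).get? "width" with
    | none => cases hh : (PySem.Dict.ofList brd).get? "height" <;> simp [hw, hh]
    | some w =>
      cases hh : (PySem.Dict.ofList brd).get? "height" with
      | none => simp [hw, hh]
      | some h =>
        simp only [hw, hh]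
        exact (coreA_eq_grid w h).trans (coreB_eq_grid w h).symm
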